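-- pv_equiv track=rewrite | github.com/golark/algos | sliding_window/sum_of_subarray.py | sums_of_subarray
-- ===== SOURCE A (Python) =====
-- def sums_of_subarray(K, arr):
--     # pre loop
--     res = []
--     s = 0
--     for i in range(K):
--         s = s + arr[i]
--     res.append(s)
--
--     # main loop
--     p = 0
--     for q in range(K, len(arr)):
--         s = s + arr[q] - arr[p]
--         res.append(s)
--         p = p + 1
--         q = q + 1
--
--     return res
-- ===== SOURCE B (Python) =====
-- def sums_of_subarray(K, arr):
--     # Prefix-sum table instead of a running sliding sum:
--     # P[i] = arr[0] + ... + arr[i-1]; each window sum is a difference of two prefixes.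
--     P = [0]
--     for x in arr:
--         P.append(P[-1] + x)
--     return [P[j + K] - P[j] for j in range(len(arr) - K + 1)]
-- ===== Notes on version B (the rewrite author's own statement) =====
-- stated objective: alternative
-- what changed: B builds a full prefix-sum table in one pass and emits each window sum as a difference of two prefixes, instead of A's single running sum updated by add-one-drop-one with an explicit trailing pointer.
import Mathlib
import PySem

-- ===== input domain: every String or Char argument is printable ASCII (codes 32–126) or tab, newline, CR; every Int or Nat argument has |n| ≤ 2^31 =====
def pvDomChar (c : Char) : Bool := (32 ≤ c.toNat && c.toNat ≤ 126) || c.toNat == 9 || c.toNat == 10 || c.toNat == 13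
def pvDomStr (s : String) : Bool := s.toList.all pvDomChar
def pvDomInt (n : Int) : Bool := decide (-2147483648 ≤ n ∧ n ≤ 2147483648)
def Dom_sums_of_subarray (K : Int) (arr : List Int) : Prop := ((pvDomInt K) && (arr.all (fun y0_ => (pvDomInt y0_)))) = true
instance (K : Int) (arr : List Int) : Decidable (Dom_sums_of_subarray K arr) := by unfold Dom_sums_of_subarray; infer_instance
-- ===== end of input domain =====

-- B replaces A's running sliding sum (add the entering, subtract the leaving element)
-- by a prefix-sum table built once, each window sum being a difference of two prefixes
-- (objective: alternative decomposition, same O(n) cost).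

-- ===== PORT A =====
def sums_of_subarray (K : Int) (arr : List Int) : List Int :=
  -- pre loop: s accumulates arr[0..K-1]
  let s := (PySem.List.pyRange 0 K 1).foldl
    (fun s i => s + PySem.List.pyGetD arr i 0) 0
  -- main loop: state is (s, res, p)
  let fin := (PySem.List.pyRange K (arr.length : Int) 1).foldl
    (fun (st : Int × List Int × Int) q =>
      let s' := st.1 + PySem.List.pyGetD arr q 0 - PySem.List.pyGetD arr st.2.2 0
      (s', st.2.1 ++ [s'], st.2.2 + 1))
    (s, [s], 0)
  fin.2.1

-- ===== PORT B =====
def sums_of_subarray_alt (K : Int) (arr : List Int) : List Int :=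
  -- P[i] = arr[0] + ... + arr[i-1]; appending P[-1] + x each step
  let P := arr.foldl (fun P x => P ++ [PySem.List.pyGetD P (-1) 0 + x]) [0]
  (PySem.List.pyRange 0 ((arr.length : Int) - K + 1) 1).map
    (fun j => PySem.List.pyGetD P (j + K) 0 - PySem.List.pyGetD P j 0)

-- ===== PRECONDITION & SPEC =====
-- A raises IndexError outside 0 ≤ K ≤ len(arr): for K > len(arr) in the pre loop,
-- for K < 0 the trailing pointer p eventually leaves the array (or arr[q] misses).
def Pre_sums_of_subarray (K : Int) (arr : List Int) : Prop :=
  0 ≤ K ∧ K ≤ (arr.length : Int)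
instance (K : Int) (arr : List Int) : Decidable (Pre_sums_of_subarray K arr) := by
  unfold Pre_sums_of_subarray; infer_instance
def pvWitness_sums_of_subarray : Int × List Int := (2, [1, 2, 3])

def Spec_sums_of_subarray (K : Int) (arr : List Int) (out : List Int) : Prop := out = sums_of_subarray_alt K arr
instance (K : Int) (arr : List Int) (out : List Int) : Decidable (Spec_sums_of_subarray K arr out) := by unfold Spec_sums_of_subarray; infer_instance

-- ===== CLAIM (what is proved, stated in full; the proofs are below) =====
def Claim_equal_sums_of_subarray : Prop := ∀ (K : Int) (arr : List Int), Dom_sums_of_subarray K arr → Pre_sums_of_subarray K arr → Spec_sums_of_subarray K arr (sums_of_subarray K arr)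

-- ===== LEMMAS AND PROOFS =====

-- the prefix list B builds is the list of sums of the prefixes of arr
theorem pv_prefix_build (l acc : List Int) (a : Int) :
    l.foldl (fun P x => P ++ [PySem.List.pyGetD P (-1) 0 + x]) (acc ++ [a])
      = acc ++ List.scanl (· + ·) a l := by
  induction l generalizing acc a with
  | nil => simp
  | cons x t ih =>
    simp only [List.foldl_cons, List.scanl_cons, PySem.List.pyGetD_neg_one_append_singleton]
    have : acc ++ [a] ++ [a + x] = (acc ++ [a]) ++ [a + x] := by simp
    rw [this, ih (acc ++ [a]) (a + x)]
    simp

theorem pv_scanl_sum (l : List Int) (a : Int) :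
    List.scanl (· + ·) a l
      = (List.range (l.length + 1)).map (fun i => a + (l.take i).sum) := by
  induction l generalizing a with
  | nil => simp
  | cons x t ih =>
    rw [List.scanl_cons, ih (a + x)]
    conv_rhs => rw [List.range_succ_eq_map]
    rw [List.map_cons, List.map_map]
    congr 1
    · simp
    · apply List.map_congr_left
      intro i _
      simp [Function.comp, Nat.succ_eq_add_one, List.take_succ_cons]
      ring

-- sum over range k of arr.getD equals the sum of the first k elements
theorem pv_sum_range_getD (arr : List Int) (k : ℕ) (hk : k ≤ arr.length) :
    ((List.range k).map (fun i => arr.getD i 0)).sum = (arr.take k).sum := by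
  induction k with
  | zero => simp
  | succ m ih =>
    have hm : m < arr.length := by omega
    rw [List.range_succ, List.map_append, List.sum_append,
        ih (by omega), List.sum_take_succ arr m hm]
    simp [List.getD_eq_getElem?_getD, hm]

-- main-loop invariant of A: starting at trailing index t with the correct window sum,
-- the loop appends the remaining m window sums
theorem pv_main_loop (arr : List Int) (k : ℕ) (hk : k ≤ arr.length) :
    ∀ (m t : ℕ) (acc : List Int), t + m = arr.length - k →
    ((PySem.List.pyRange ((k : Int) + (t : Int)) (arr.length : Int) 1).foldl
      (fun (st : Int × List Int × Int) q =>
        let s' := st.1 + PySem.List.pyGetD arr q 0 - PySem.List.pyGetD arr st.2.2 0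
        (s', st.2.1 ++ [s'], st.2.2 + 1))
      ((arr.take (k + t)).sum - (arr.take t).sum, acc, (t : Int))).2.1
    = acc ++ (List.range m).map
        (fun j => (arr.take (k + t + 1 + j)).sum - (arr.take (t + 1 + j)).sum) := by
  intro m
  induction m with
  | zero =>
    intro t acc ht
    have h1 : ((arr.length : Int)) ≤ (k : Int) + (t : Int) := by
      have h2 : arr.length ≤ k + t := by omega
      exact_mod_cast h2
    rw [PySem.List.pyRange_one_eq_nil h1]
    simp
  | succ m ih =>
    intro t acc ht
    have hlt : (k : Int) + (t : Int) < (arr.length : Int) := by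
      have h2 : k + t < arr.length := by omega
      exact_mod_cast h2
    rw [PySem.List.pyRange_one_cons hlt]
    simp only [List.foldl_cons]
    have hq : (k : Int) + (t : Int) = ((k + t : ℕ) : Int) := by push_cast; ring
    have hkt : k + t < arr.length := by omega
    have htl : t < arr.length := by omega
    have hstep :
        (arr.take (k + t)).sum - (arr.take t).sum
          + PySem.List.pyGetD arr ((k : Int) + (t : Int)) 0
          - PySem.List.pyGetD arr ((t : Int)) 0
        = (arr.take (k + (t + 1))).sum - (arr.take (t + 1)).sum := by
      rw [hq, PySem.List.pyGetD_natCast, PySem.List.pyGetD_natCast]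
      have e1 : k + (t + 1) = (k + t) + 1 := by omega
      rw [e1, List.sum_take_succ arr (k + t) hkt, List.sum_take_succ arr t htl]
      simp [List.getD_eq_getElem?_getD, hkt, htl]
      ring
    have hnext : (k : Int) + (t : Int) + 1 = (k : Int) + ((t + 1 : ℕ) : Int) := by
      push_cast; ring
    have hstate : (t : Int) + 1 = ((t + 1 : ℕ) : Int) := by push_cast; ring
    simp only [hstep, hstate, hnext]
    rw [ih (t + 1) (acc ++ [(arr.take (k + (t + 1))).sum - (arr.take (t + 1)).sum]) (by omega)]
    rw [List.range_succ_eq_map, List.map_cons, List.append_assoc,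
        List.singleton_append, List.map_map]
    refine congrArg (acc ++ ·) ?_
    refine congrArg₂ List.cons ?_ ?_
    · have e1 : k + t + 1 + 0 = k + (t + 1) := by omega
      have e2 : t + 1 + 0 = t + 1 := by omega
      show _ = (List.take (k + t + 1 + 0) arr).sum - (List.take (t + 1 + 0) arr).sum
      rw [e1, e2]
    · apply List.map_congr_left
      intro j _
      simp only [Function.comp, Nat.succ_eq_add_one]
      have e1 : k + t + 1 + (j + 1) = k + (t + 1) + 1 + j := by omega
      have e2 : t + 1 + (j + 1) = t + 1 + 1 + j := by omega
      rw [e1, e2]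

-- ===== VERDICT (by name: the statement is the Claim_ definition above) =====
theorem sums_of_subarray_spec : Claim_equal_sums_of_subarray := by
  intro K arr _ hpre
  obtain ⟨hK0, hKn⟩ := hpre
  obtain ⟨k, rfl⟩ := Int.eq_ofNat_of_zero_le hK0
  have hk : k ≤ arr.length := by exact_mod_cast hKn
  unfold Spec_sums_of_subarray sums_of_subarray sums_of_subarray_alt
  -- A's pre loop computes the sum of the first k elements
  have hpre_s :
      (PySem.List.pyRange 0 (k : Int) 1).foldl (fun s i => s + PySem.List.pyGetD arr i 0) 0
        = (arr.take k).sum := by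
    rw [PySem.List.pyRange_zero_natCast, List.foldl_map, PySem.List.foldl_add]
    have hmap : (List.range k).map (fun (i : ℕ) => PySem.List.pyGetD arr (i : Int) 0)
        = (List.range k).map (fun i => arr.getD i 0) :=
      List.map_congr_left (fun i _ => PySem.List.pyGetD_natCast arr i 0)
    rw [hmap, pv_sum_range_getD arr k hk]
    ring
  -- B's prefix list is the list of prefix sums
  have hP : arr.foldl (fun P x => P ++ [PySem.List.pyGetD P (-1) 0 + x]) [0]
      = (List.range (arr.length + 1)).map (fun i => (arr.take i).sum) := by
    have hpb := pv_prefix_build arr [] 0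
    simp only [List.nil_append] at hpb
    rw [hpb, pv_scanl_sum]
    simp
  simp only [hpre_s, hP]
  -- rewrite A's main loop with the invariant at t = 0
  have hA := pv_main_loop arr k hk (arr.length - k) 0 [(arr.take k).sum] (by omega)
  simp only [Nat.cast_zero, add_zero, zero_add, List.take_zero, List.sum_nil, sub_zero] at hA
  rw [hA]
  -- rewrite B's output range
  have hlen : ((arr.length : Int) - (k : Int) + 1) = ((arr.length - k + 1 : ℕ) : Int) := by
    omega
  rw [hlen, PySem.List.pyRange_zero_natCast, List.map_map]
  -- B's map, restricted to the range, is the list of window sums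
  have hB : ((List.range (arr.length - k + 1)).map
      ((fun j => PySem.List.pyGetD ((List.range (arr.length + 1)).map (fun i => (arr.take i).sum)) (j + (k : Int)) 0
        - PySem.List.pyGetD ((List.range (arr.length + 1)).map (fun i => (arr.take i).sum)) j 0)
        ∘ (fun (kk : ℕ) => (kk : Int))))
      = (List.range (arr.length - k + 1)).map
          (fun j => (arr.take (k + j)).sum - (arr.take j).sum) := by
    apply List.map_congr_left
    intro j hj
    rw [List.mem_range] at hj
    simp only [Function.comp]
    have h1 : (j : Int) + (k : Int) = ((j + k : ℕ) : Int) := by push_cast; ring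
    rw [h1, PySem.List.pyGetD_natCast, PySem.List.pyGetD_natCast,
        PySem.List.getD_map_range _ _ _ _ (by omega : j + k < arr.length + 1),
        PySem.List.getD_map_range _ _ _ _ (by omega : j < arr.length + 1),
        Nat.add_comm j k]
  rw [hB, List.range_succ_eq_map, List.map_cons, List.map_map]
  refine congrArg₂ List.cons ?_ ?_
  · simp
  · apply List.map_congr_left
    intro j _
    simp only [Function.comp, Nat.succ_eq_add_one]
    have e1 : k + (j + 1) = k + 1 + j := by omega
    have e2 : j + 1 = 1 + j := by omega
    rw [e1, e2]
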